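-- pv_equiv track=rewrite | github.com/lxs987/Programmers | Kakao/Lv. 2/n진수 게임.py | solution
-- ===== SOURCE A (Python) =====
-- import string
--
-- tmp = string.digits+string.ascii_uppercase
--
-- def convert(num, base) :
--     q, r = divmod(num, base)
--     if q == 0 :
--         return tmp[r]
--     else :
--         return convert(q, base) + tmp[r]
--
-- def solution(n, t, m, p):
--     converted = ''
--     answer = ''
--     for i in range(t*m):
--         converted += convert(i, n)
--     for i in range(p-1, t*m, m):
--         answer+=converted[i]
--     return answer
-- ===== SOURCE B (Python) =====
-- import string
--
-- tmp = string.digits + string.ascii_uppercase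
--
-- def solution(n, t, m, p):
--     limit = t * m
--     digits = []
--     i = 0
--     while len(digits) < limit:
--         ds = []
--         x = i
--         while True:
--             x, r = divmod(x, n)
--             ds.append(tmp[r])
--             if x == 0:
--                 break
--         digits.extend(reversed(ds))
--         i += 1
--     return ''.join(digits[p-1:limit:m])
-- ===== Notes on version B (the rewrite author's own statement) =====
-- stated objective: faster
-- what changed: Instead of concatenating the base-n representation of every i in range(t*m) into one big string (t*m numbers, each contributing all its digits) and then indexing it at p-1, p-1+m, ..., B streams: an iterative (while-loop, back-to-front) digit extraction feeds a digit list that stops growing as soon as t*m digits exist, and the answer is a single stepped slice digits[p-1:t*m:m].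
-- outside the precondition, e.g. on solution(2, 2, 2, 0): A returns '110', B returns '0'; on solution(2, -2, -2, 6): A returns '1', B returns ''; on solution(-2, 2, 2, 1): A returns '0Z', B returns '0Z'
import Mathlib
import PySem

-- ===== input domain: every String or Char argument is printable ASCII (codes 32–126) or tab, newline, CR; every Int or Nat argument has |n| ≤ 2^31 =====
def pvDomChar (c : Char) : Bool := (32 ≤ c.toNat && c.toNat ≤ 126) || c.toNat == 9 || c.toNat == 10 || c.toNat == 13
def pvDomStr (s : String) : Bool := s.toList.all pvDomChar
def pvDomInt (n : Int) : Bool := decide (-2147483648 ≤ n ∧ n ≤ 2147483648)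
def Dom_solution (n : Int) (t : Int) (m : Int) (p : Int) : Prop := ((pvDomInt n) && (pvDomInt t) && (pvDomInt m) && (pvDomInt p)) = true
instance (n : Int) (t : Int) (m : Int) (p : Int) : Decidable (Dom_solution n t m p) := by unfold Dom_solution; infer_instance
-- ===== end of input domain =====

-- B replaces A's build-the-whole-string-then-index with a streaming digit list that stops at t*m
-- digits plus one stepped slice (objective: faster — iterates numbers only until t*m digits exist).

-- tmp = string.digits + string.ascii_uppercase (shared constant of the module)
def pvTmp : List Char := "0123456789ABCDEFGHIJKLMNOPQRSTUVWXYZ".toList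

-- ===== PORT A =====
-- convert(num, base): recursive; fuel only totalizes Python's recursion (100 is enough on Pre_,
-- since every admitted i fits in far fewer than 100 base-n digits).
def pvConvertA (fuel : Nat) (num base : Int) : List Char :=
  match fuel with
  | 0 => []
  | f+1 =>
    let q := PySem.Int.floordiv num base
    let r := PySem.Int.mod num base
    if q = 0 then [PySem.List.pyGetD pvTmp r ' ']
    else pvConvertA f q base ++ [PySem.List.pyGetD pvTmp r ' ']

def solution (n : Int) (t : Int) (m : Int) (p : Int) : String :=
  let converted := (PySem.List.pyRange 0 (t*m) 1).foldl (fun acc i => acc ++ pvConvertA 100 i n) []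
  let answer := (PySem.List.pyRange (p-1) (t*m) m).foldl
    (fun acc i => acc ++ [PySem.List.pyGetD converted i ' ']) []
  String.ofList answer

-- ===== PORT B =====
-- inner while True: ds.append(tmp[r]) until x == 0 (least-significant digit first; fuel totalizes)
def pvDigitsOf (fuel : Nat) (x n : Int) : List Char :=
  match fuel with
  | 0 => []
  | f+1 =>
    let q := PySem.Int.floordiv x n
    let r := PySem.Int.mod x n
    if q = 0 then [PySem.List.pyGetD pvTmp r ' ']
    else PySem.List.pyGetD pvTmp r ' ' :: pvDigitsOf f q n

-- outer while len(digits) < limit; fuel limit.toNat totalizes it (each pass adds ≥ 1 digit)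
def pvLoopB (n limit : Int) : Nat → Int → List Char → List Char
  | 0, _, acc => acc
  | f+1, i, acc =>
    if (acc.length : Int) < limit then pvLoopB n limit f (i+1) (acc ++ (pvDigitsOf 100 i n).reverse)
    else acc

def solution_alt (n : Int) (t : Int) (m : Int) (p : Int) : String :=
  let limit := t*m
  let digits := pvLoopB n limit limit.toNat 0 []
  String.ofList ((PySem.List.slice? digits (some (p-1)) (some limit) m).getD [])

-- ===== PRECONDITION & SPEC =====
-- Pre_ admits the normal domain (base 2..36, m, p ≥ 1; n > 36 only while no digit ≥ 36 appears,
-- i.e. t*m ≤ 36) plus the inputs whose sampled index range is empty (A returns '' untouched).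
-- It excludes inputs A only survives by accident or not at all: n ≤ 1 with a nonempty sample
-- (ZeroDivisionError / RecursionError / accidental negative tmp-indexing for negative bases),
-- n > 36 with t*m > 36 (IndexError once a digit ≥ 36 appears), and a nonempty sample with
-- p ≤ 0 or m < 0 (Python's negative indices wrap to the string's end, an accident of A).
def Pre_solution (n : Int) (t : Int) (m : Int) (p : Int) : Prop :=
  (2 ≤ n ∧ 1 ≤ m ∧ 1 ≤ p ∧ (n ≤ 36 ∨ t*m ≤ 36)) ∨
  (t*m ≤ 0 ∧ ((0 < m ∧ t*m ≤ p - 1) ∨ (m < 0 ∧ p - 1 ≤ t*m)))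
instance (n : Int) (t : Int) (m : Int) (p : Int) : Decidable (Pre_solution n t m p) := by
  unfold Pre_solution; infer_instance

def pvWitness_solution : Int × Int × Int × Int := (2, 2, 2, 1)

def Spec_solution (n : Int) (t : Int) (m : Int) (p : Int) (out : String) : Prop := out = solution_alt n t m p
instance (n : Int) (t : Int) (m : Int) (p : Int) (out : String) : Decidable (Spec_solution n t m p out) := by unfold Spec_solution; infer_instance

-- ===== CLAIM (what is proved, stated in full; the proofs are below) =====
def Claim_equal_solution : Prop := ∀ (n : Int) (t : Int) (m : Int) (p : Int), Dom_solution n t m p → Pre_solution n t m p → Spec_solution n t m p (solution n t m p)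

-- ===== LEMMAS AND PROOFS =====

-- A's recursive convert produces exactly the reverse of B's least-significant-first digit list.
lemma convA_eq_reverse_digitsOf : ∀ (fuel : Nat) (x n : Int), 0 ≤ x → 2 ≤ n → x < n ^ fuel →
    pvConvertA fuel x n = (pvDigitsOf fuel x n).reverse := by
  intro fuel
  induction fuel with
  | zero => intro x n _ _ _; rfl
  | succ f ih =>
    intro x n hx hn hlt
    have hq0 : 0 ≤ PySem.Int.floordiv x n := by
      rw [PySem.Int.floordiv_eq_ediv_of_pos (by omega)]; exact Int.ediv_nonneg hx (by omega)
    have hqlt : PySem.Int.floordiv x n < n ^ f := by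
      rw [PySem.Int.floordiv_lt_iff_lt_mul (by omega)]
      calc x < n ^ (f+1) := hlt
        _ = n ^ f * n := pow_succ n f
    simp only [pvConvertA, pvDigitsOf]
    split
    · rfl
    · rw [ih _ _ hq0 hn hqlt, List.reverse_cons]

lemma digitsOf_succ_ne_nil (f : Nat) (x n : Int) : pvDigitsOf (f+1) x n ≠ [] := by
  simp only [pvDigitsOf]
  split <;> simp

lemma digitsOf_ne_nil (x n : Int) : pvDigitsOf 100 x n ≠ [] := digitsOf_succ_ne_nil 99 x n

-- Characterisation of B's outer while loop: it emits the concatenated representations of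
-- i, i+1, …, j-1 for some j, and once fuel covers the missing length the result is long enough.
lemma loopB_spec (n L : Int) (hn : 2 ≤ n) :
    ∀ (fuel : Nat) (i : Int) (acc : List Char), 0 ≤ i → i + fuel ≤ 2 ^ 100 →
    ∃ j : Int, i ≤ j ∧ j ≤ i + fuel ∧
      pvLoopB n L fuel i acc = acc ++ (PySem.List.pyRange i j 1).flatMap (fun k => pvConvertA 100 k n) ∧
      (L ≤ (acc.length : Int) + fuel → L ≤ ((pvLoopB n L fuel i acc).length : Int)) := by
  intro fuel
  induction fuel with
  | zero =>
    intro i acc hi _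
    refine ⟨i, le_refl i, by omega, ?_, ?_⟩
    · rw [PySem.List.pyRange_one_eq_nil (le_refl i)]; simp [pvLoopB]
    · intro h; simp only [pvLoopB]; push_cast at h; omega
  | succ f ih =>
    intro i acc hi hbound
    by_cases hlen : (acc.length : Int) < L
    · have hilt : i < n ^ 100 := by
        have h2 : (2:Int) ^ 100 ≤ n ^ 100 := pow_le_pow_left₀ (by omega) hn 100
        omega
      have hconv : (pvDigitsOf 100 i n).reverse = pvConvertA 100 i n :=
        (convA_eq_reverse_digitsOf 100 i n hi hn hilt).symm
      obtain ⟨j, hij, hjf, heq, hlong⟩ := ih (i+1) (acc ++ (pvDigitsOf 100 i n).reverse)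
        (by omega) (by push_cast at hbound ⊢; omega)
      have hstep : pvLoopB n L (f+1) i acc = pvLoopB n L f (i+1) (acc ++ (pvDigitsOf 100 i n).reverse) := by
        simp only [pvLoopB, if_pos hlen]
      refine ⟨j, by omega, by push_cast; omega, ?_, ?_⟩
      · rw [hstep, heq, hconv,
          PySem.List.pyRange_one_append i (i+1) j (by omega) hij,
          PySem.List.pyRange_one_singleton]
        simp
      · intro h
        rw [hstep]
        apply hlong
        have h1 : 1 ≤ ((pvDigitsOf 100 i n).reverse.length : Int) := by
          have := digitsOf_ne_nil i n
          have : 0 < (pvDigitsOf 100 i n).reverse.length := by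
            simpa [List.length_pos_iff] using this
          omega
        have hl : (acc ++ (pvDigitsOf 100 i n).reverse).length
            = acc.length + (pvDigitsOf 100 i n).reverse.length := List.length_append
        push_cast [hl]
        push_cast at h
        omega
    · refine ⟨i, le_refl i, by omega, ?_, ?_⟩
      · rw [PySem.List.pyRange_one_eq_nil (le_refl i)]
        simp only [pvLoopB, if_neg hlen]; simp
      · intro _; simp only [pvLoopB, if_neg hlen]; omega

-- A stepped slice with nonnegative in-range bounds and positive step is the pointwise sample.
lemma slice?_pos_eq_map (xs : List Char) (a b step : Int)
    (hst : 0 < step) (ha : 0 ≤ a) (hb : 0 ≤ b) (hbl : b ≤ (xs.length : Int)) :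
    PySem.List.slice? xs (some a) (some b) step =
      some ((PySem.List.pyRange a b step).map (fun i => PySem.List.pyGetD xs i ' ')) := by
  rw [PySem.List.pyRange_of_pos a b hst]
  simp only [PySem.List.slice?, PySem.List.sliceIndices,
    if_neg (show ¬ step = 0 by omega), if_neg (show ¬ step < 0 by omega), if_pos hst,
    if_neg (show ¬ a < 0 by omega), if_neg (show ¬ b < 0 by omega),
    min_eq_left (show b ≤ (xs.length:Int) from hbl)]
  by_cases hab : a < b
  · rw [min_eq_left (show a ≤ (xs.length:Int) by omega), if_pos hab, List.map_map]
    congr 1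
    have key : ∀ k ∈ List.range ((b - a + step - 1) / step).toNat,
        xs[(a + step * (k:Int)).toNat]? = some (PySem.List.pyGetD xs (a + step * (k:Int)) ' ') := by
      intro k hk
      rw [List.mem_range] at hk
      have h1 : ((k:Int) + 1) ≤ (b - a + step - 1) / step := by omega
      have h2 : ((k:Int) + 1) * step ≤ b - a + step - 1 := (Int.le_ediv_iff_mul_le hst).mp h1
      rw [add_mul, one_mul] at h2
      have hlt : a + step * (k:Int) < b := by
        have : (k:Int) * step = step * (k:Int) := mul_comm _ _
        linarith
      have hge : 0 ≤ a + step * (k:Int) := by positivity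
      have hltn : (a + step * (k:Int)).toNat < xs.length := by omega
      rw [List.getElem?_eq_getElem hltn,
        PySem.List.pyGetD_eq_getElem xs ' ' hge (by omega)]
    rw [List.filterMap_congr key]
    simp only [Function.comp_def]
    exact congrFun List.filterMap_eq_map _
  · rw [if_neg hab, if_neg (show ¬ min a (xs.length:Int) < b by omega)]
    simp


lemma pyRange_neg_eq_nil (a b s : Int) (hs : s < 0) (hab : a ≤ b) :
    PySem.List.pyRange a b s = [] := by
  simp [PySem.List.pyRange, show ¬ s = 0 by omega, show ¬ 0 < s by omega, show ¬ b < a by omega]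

lemma slice?_nil (a b st : Int) (hst : ¬ st = 0) :
    PySem.List.slice? ([] : List Char) (some a) (some b) st = some [] := by
  simp [PySem.List.slice?, PySem.List.sliceIndices, hst]

-- ===== VERDICT (by name: the statement is the Claim_ definition above) =====
theorem solution_spec : Claim_equal_solution := by
  intro n t m p hdom hpre
  rcases hpre with ⟨hn, hm, hp, -⟩ | ⟨hL0, hcase⟩
  case inr =>
    have hm0 : ¬ m = 0 := by rcases hcase with ⟨h1, -⟩ | ⟨h1, -⟩ <;> omega
    unfold Spec_solution solution solution_alt
    simp only [PySem.List.foldl_append_eq_flatMap, List.nil_append]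
    have hLnat : (t * m).toNat = 0 := by omega
    have hEmpty : PySem.List.pyRange (p - 1) (t * m) m = [] := by
      rcases hcase with ⟨h1, h2⟩ | ⟨h1, h2⟩
      · rw [PySem.List.pyRange_of_pos _ _ h1, if_neg (show ¬ p - 1 < t * m by omega)]
        simp
      · exact pyRange_neg_eq_nil _ _ _ h1 h2
    rw [hLnat, hEmpty]
    rw [show pvLoopB n (t * m) 0 0 [] = [] from rfl, slice?_nil _ _ _ hm0]
    simp
  case inl =>
    simp only [Dom_solution, pvDomInt, Bool.and_eq_true, decide_eq_true_eq] at hdom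
    obtain ⟨⟨⟨-, ⟨ht1, ht2⟩⟩, ⟨hm1, hm2⟩⟩, -⟩ := hdom
    have hL62 : t * m ≤ 2 ^ 62 := by nlinarith
    unfold Spec_solution solution solution_alt
    simp only [PySem.List.foldl_append_eq_flatMap, List.nil_append]
    obtain ⟨j, hj0, hjle, hdig, hlen⟩ := loopB_spec n (t*m) hn (t*m).toNat 0 []
      (le_refl 0) (by omega)
    simp only [List.nil_append] at hdig
    have hlenD : t * m ≤ ((pvLoopB n (t*m) (t*m).toNat 0 []).length : Int) := hlen (by omega)
    by_cases hLpos : 0 < t * m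
    · -- the sampled indices
      have hjL : j ≤ t * m := by omega
      have hsplit := PySem.List.pyRange_one_append 0 j (t*m) hj0 hjL
      rw [hsplit, List.flatMap_append, ← hdig,
        slice?_pos_eq_map _ _ _ _ (by omega) (by omega) (by omega) hlenD, Option.getD_some,
        ← List.map_eq_flatMap]
      apply congrArg
      apply List.map_congr_left
      intro i hi
      rw [PySem.List.mem_pyRange_iff_of_pos (by omega)] at hi
      obtain ⟨hi1, hi2, -⟩ := hi
      have hge : 0 ≤ i := by omega
      have hiD : i.toNat < (pvLoopB n (t*m) (t*m).toNat 0 []).length := by omega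
      rw [PySem.List.pyGetD_eq_getElem _ ' ' hge
          (by rw [List.length_append]; push_cast; omega),
        PySem.List.pyGetD_eq_getElem _ ' ' hge (by omega),
        List.getElem_append_left hiD]
    · -- t*m ≤ 0 : both sides are the empty string
      have hj00 : j = 0 := by omega
      have hdnil : pvLoopB n (t*m) (t*m).toNat 0 [] = [] := by
        rw [hdig, hj00, PySem.List.pyRange_one_eq_nil (le_refl 0)]
        rfl
      rw [hdnil, PySem.List.pyRange_of_pos _ _ (show (0:Int) < m by omega),
        if_neg (show ¬ p - 1 < t * m by omega)]
      simp [PySem.List.slice?, PySem.List.sliceIndices, show ¬ m = 0 by omega]
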